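-- pv_equiv track=rewrite | github.com/alec-jensen/firescript | firescript/lsp_server.py | _word_at_offset
-- ===== SOURCE A (Python) =====
-- def _word_at_offset(source: str, offset: int) -> str:
--     """Return the identifier word that contains (or is immediately before) offset."""
--     offset = min(offset, len(source))
--     start = offset
--     while start > 0 and (source[start - 1].isalnum() or source[start - 1] == "_"):
--         start -= 1
--     end = offset
--     while end < len(source) and (source[end].isalnum() or source[end] == "_"):
--         end += 1
--     return source[start:end]
-- ===== SOURCE B (Python) =====
-- def _word_at_offset(source: str, offset: int) -> str:
--     """Return the identifier word that contains (or is immediately before) offset."""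
--     offset = min(offset, len(source))
--     # one forward pass: collect all maximal identifier-character runs as (start, end) spans
--     spans = []
--     run_start = None
--     for i, c in enumerate(source):
--         if c.isalnum() or c == "_":
--             if run_start is None:
--                 run_start = i
--         elif run_start is not None:
--             spans.append((run_start, i))
--             run_start = None
--     if run_start is not None:
--         spans.append((run_start, len(source)))
--     # the runs are non-adjacent, so at most one span satisfies start <= offset <= end
--     for s, e in spans:
--         if s <= offset <= e:
--             return source[s:e]
--     return ""
-- ===== Notes on version B (the rewrite author's own statement) =====
-- stated objective: alternative
-- what changed: B replaces A's two local while-scans around the offset by one forward pass that collects all maximal identifier runs as (start,end) spans and returns the unique span containing the clamped offset (inclusive on both ends), '' if none.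
-- intended difference: On in-range negative offsets pointing at an identifier character, where A's negative-index wraparound scan ends past the pointed-at position, A returns a word picked up via Python's negative-index wraparound (e.g. 'b' for ('ab', -1)); B returns '' because no identifier run contains a negative offset, the intended result for an out-of-range cursor. — e.g. on _word_at_offset("ab", -1): A returns "b", B returns ""
import Mathlib
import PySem

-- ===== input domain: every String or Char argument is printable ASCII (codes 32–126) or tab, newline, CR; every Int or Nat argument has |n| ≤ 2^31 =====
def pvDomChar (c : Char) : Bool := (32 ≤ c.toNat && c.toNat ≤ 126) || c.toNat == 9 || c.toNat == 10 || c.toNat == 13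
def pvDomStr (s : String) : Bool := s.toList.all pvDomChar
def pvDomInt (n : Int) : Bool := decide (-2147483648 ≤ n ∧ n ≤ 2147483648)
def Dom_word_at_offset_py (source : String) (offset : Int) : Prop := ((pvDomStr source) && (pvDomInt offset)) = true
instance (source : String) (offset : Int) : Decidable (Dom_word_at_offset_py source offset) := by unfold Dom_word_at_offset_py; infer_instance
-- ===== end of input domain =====

-- B collects all maximal identifier runs in one forward pass and picks the span containing the
-- clamped offset, instead of A's two local while-scans; same O(n) cost, different decomposition.

-- ===== PORT A =====

-- c.isalnum() or c == "_"
def pvIdentChar (c : Char) : Bool := PySem.Chars.isalnum c || c == '_'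

-- while start > 0 and (source[start-1].isalnum() or source[start-1] == "_"): start -= 1
-- (the loop counts start down from its initial value; it is written as structural recursion on
--  start.toNat, which decreases by 1 per iteration exactly as the Python counter does;
--  source[start-1] via pyGet?)
def pvAStartAux (cs : List Char) : Nat → Int
  | 0 => 0
  | n + 1 =>
    if (PySem.List.pyGet? cs ((n + 1 : Int) - 1)).any pvIdentChar then pvAStartAux cs n
    else (n + 1 : Int)

def pvAStart (cs : List Char) (start : Int) : Int :=
  if start ≤ 0 then start else pvAStartAux cs start.toNat

-- while end < len(source) and (source[end].isalnum() or source[end] == "_"): end += 1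
-- (structural recursion on the remaining distance (len - end).toNat, which is 0 exactly when the
--  guard end < len fails and decreases by 1 per iteration; pyGet? = none is Python's IndexError,
--  Pre_ excludes those inputs)
def pvAEndAux (cs : List Char) (e : Int) : Nat → Int
  | 0 => e
  | n + 1 =>
    if (PySem.List.pyGet? cs e).any pvIdentChar then pvAEndAux cs (e + 1) n
    else e

def pvAEnd (cs : List Char) (e : Int) : Int :=
  pvAEndAux cs e ((cs.length : Int) - e).toNat

def word_at_offset_py (source : String) (offset : Int) : String :=
  String.ofList (PySem.List.slice source.toList
    (some (pvAStart source.toList (min offset (source.toList.length : Int))))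
    (some (pvAEnd source.toList (min offset (source.toList.length : Int)))))

-- ===== PORT B =====

-- the enumerate loop of Source B: collect maximal identifier runs as (start, end) spans
def pvBSpans (cs : List Char) (i : Int) (runStart : Option Int) : List (Int × Int) :=
  match cs with
  | [] =>
    match runStart with
    | some s => [(s, i)]
    | none => []
  | c :: rest =>
    if pvIdentChar c then
      pvBSpans rest (i + 1) (match runStart with | none => some i | some s => some s)
    else
      match runStart with
      | some s => (s, i) :: pvBSpans rest (i + 1) none
      | none => pvBSpans rest (i + 1) none

def word_at_offset_py_alt (source : String) (offset : Int) : String :=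
  match (pvBSpans source.toList 0 none).find?
      (fun q => decide (q.1 ≤ min offset (source.toList.length : Int)) &&
                decide (min offset (source.toList.length : Int) ≤ q.2)) with
  | some (s, e) => String.ofList (PySem.List.slice source.toList (some s) (some e))
  | none => ""

-- ===== PRECONDITION & SPEC =====

-- Pre_ excludes exactly the inputs where A raises IndexError: offset < -len(source).
def Pre_word_at_offset_py (source : String) (offset : Int) : Prop :=
  -(source.toList.length : Int) ≤ offset
instance (source : String) (offset : Int) : Decidable (Pre_word_at_offset_py source offset) := by
  unfold Pre_word_at_offset_py; infer_instance

def pvWitness_word_at_offset_py : String × Int := ("foo bar", 5)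

-- On in-range negative offsets pointing at an identifier character, where A's wraparound scan ends
-- past the pointed-at position, A returns a word picked up via Python's negative-index wraparound
-- (e.g. "b" for ("ab", -1)); B returns "" because no identifier run contains a negative offset,
-- the intended result for an out-of-range cursor.
def D_word_at_offset_py (source : String) (offset : Int) : Prop :=
  offset < 0 ∧ -(source.toList.length : Int) ≤ offset ∧
  (PySem.List.pyGet? source.toList offset).any pvIdentChar = true ∧
  (¬ (source.toList.drop ((source.toList.length : Int) + offset).toNat).all pvIdentChar = true ∨
   ((source.toList.length : Int) + offset).toNat < (source.toList.takeWhile pvIdentChar).length)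
instance (source : String) (offset : Int) : Decidable (D_word_at_offset_py source offset) := by
  unfold D_word_at_offset_py; infer_instance

def Spec_word_at_offset_py (source : String) (offset : Int) (out : String) : Prop :=
  ¬ D_word_at_offset_py source offset → out = word_at_offset_py_alt source offset
instance (source : String) (offset : Int) (out : String) : Decidable (Spec_word_at_offset_py source offset out) := by
  unfold Spec_word_at_offset_py; infer_instance

def pvDiffWitness_word_at_offset_py : String × Int := ("ab", -1)
def pvDiffWitnessOut_word_at_offset_py : String × String := ("b", "")

-- ===== CLAIM (what is proved, stated in full; the proofs are below) =====
def Claim_unchanged_word_at_offset_py : Prop := ∀ (source : String) (offset : Int), Dom_word_at_offset_py source offset → Pre_word_at_offset_py source offset → Spec_word_at_offset_py source offset (word_at_offset_py source offset)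
def Claim_changed_word_at_offset_py : Prop := Dom_word_at_offset_py (pvDiffWitness_word_at_offset_py.1) (pvDiffWitness_word_at_offset_py.2) ∧ Pre_word_at_offset_py (pvDiffWitness_word_at_offset_py.1) (pvDiffWitness_word_at_offset_py.2) ∧ D_word_at_offset_py (pvDiffWitness_word_at_offset_py.1) (pvDiffWitness_word_at_offset_py.2) ∧ word_at_offset_py (pvDiffWitness_word_at_offset_py.1) (pvDiffWitness_word_at_offset_py.2) = pvDiffWitnessOut_word_at_offset_py.1 ∧ word_at_offset_py_alt (pvDiffWitness_word_at_offset_py.1) (pvDiffWitness_word_at_offset_py.2) = pvDiffWitnessOut_word_at_offset_py.2 ∧ pvDiffWitnessOut_word_at_offset_py.1 ≠ pvDiffWitnessOut_word_at_offset_py.2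
def Claim_exact_word_at_offset_py : Prop := ∀ (source : String) (offset : Int), Dom_word_at_offset_py source offset → Pre_word_at_offset_py source offset → D_word_at_offset_py source offset → word_at_offset_py source offset ≠ word_at_offset_py_alt source offset

-- ===== LEMMAS AND PROOFS =====

-- length of the maximal identifier run ending just before position j / starting at position j
def pvLenL (cs : List Char) (j : Nat) : Nat := (((cs.take j).reverse).takeWhile pvIdentChar).length
def pvLenR (cs : List Char) (j : Nat) : Nat := ((cs.drop j).takeWhile pvIdentChar).length

-- the value B's span search produces when no open run covers the position
def pvSpec (cs : List Char) (p : Int) (j : Nat) : Option (Int × Int) :=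
  if pvLenL cs j = 0 ∧ pvLenR cs j = 0 then none
  else some (p - (pvLenL cs j : Int), p + (pvLenR cs j : Int))

lemma ofList_ne_empty (l : List Char) (h : l ≠ []) : String.ofList l ≠ "" := by
  intro he; apply h
  have := congrArg String.toList he; simpa using this

lemma all_of_takeWhile_length {l : List Char} {f : Char → Bool}
    (h : (l.takeWhile f).length = l.length) : l.all f = true := by
  have h2 : l.takeWhile f = l := (List.takeWhile_prefix f).eq_of_length h
  rw [List.all_eq_true]
  exact fun x hx => (List.takeWhile_eq_self_iff).mp h2 x hx

lemma all_drop_mono (l : List Char) (a b : Nat) (hab : a ≤ b)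
    (h : (l.drop a).all pvIdentChar = true) : (l.drop b).all pvIdentChar = true := by
  have hd : l.drop b = (l.drop a).drop (b - a) := by
    rw [List.drop_drop]; congr 1; omega
  rw [hd, List.all_eq_true] at *
  exact fun x hx => h x (List.mem_of_mem_drop hx)

lemma slice_self (cs : List Char) (a : Int) : PySem.List.slice cs (some a) (some a) = [] := by
  apply List.eq_nil_of_length_eq_zero
  rw [PySem.List.length_slice]; omega

lemma lenL_zero (cs : List Char) : pvLenL cs 0 = 0 := rfl

lemma lenL_succ (cs : List Char) (n : Nat) (hn : n < cs.length) :
    pvLenL cs (n+1) = if pvIdentChar cs[n] then pvLenL cs n + 1 else 0 := by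
  unfold pvLenL
  rw [List.take_add_one]
  simp only [List.getElem?_eq_getElem hn, Option.toList_some, List.reverse_append,
    List.reverse_singleton, List.singleton_append, List.takeWhile_cons]
  by_cases hc : pvIdentChar cs[n] <;> simp [hc]

lemma lenL_le (cs : List Char) (j : Nat) : pvLenL cs j ≤ j := by
  unfold pvLenL
  calc (((cs.take j).reverse).takeWhile pvIdentChar).length
      ≤ ((cs.take j).reverse).length := (List.takeWhile_prefix _).length_le
    _ ≤ j := by simp [List.length_take]

lemma lenR_eq (cs : List Char) (n : Nat) (hn : n < cs.length) :
    pvLenR cs n = if pvIdentChar cs[n] then pvLenR cs (n+1) + 1 else 0 := by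
  unfold pvLenR
  rw [← List.getElem_cons_drop hn, List.takeWhile_cons]
  by_cases hc : pvIdentChar cs[n]
  · rw [if_pos hc, if_pos hc, List.length_cons]
  · rw [if_neg (by simp [hc]), if_neg (by simp [hc]), List.length_nil]

lemma lenR_cons_zero_pos (c : Char) (rest : List Char) (hc : pvIdentChar c = true) :
    pvLenR (c :: rest) 0 = (rest.takeWhile pvIdentChar).length + 1 := by
  simp [pvLenR, hc]

lemma lenR_cons_zero_neg (c : Char) (rest : List Char) (hc : ¬ pvIdentChar c = true) :
    pvLenR (c :: rest) 0 = 0 := by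
  simp [pvLenR, hc]

lemma lenL_cons (c : Char) (rest : List Char) (j : Nat) (hj : j ≤ rest.length) :
    pvLenL (c :: rest) (j+1) =
      if pvLenL rest j = j then j + (if pvIdentChar c then 1 else 0) else pvLenL rest j := by
  unfold pvLenL
  rw [show ((c :: rest).take (j+1)).reverse = (rest.take j).reverse ++ [c] by simp]
  rw [List.takeWhile_append]
  have hX : (rest.take j).reverse.length = j := by simp [List.length_take]; omega
  rw [hX]
  by_cases h : ((rest.take j).reverse.takeWhile pvIdentChar).length = j
  · rw [if_pos h, if_pos h]
    by_cases hc : pvIdentChar c <;> simp [hc, hX]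
  · rw [if_neg h, if_neg h]

lemma lenR_cons_succ (c : Char) (rest : List Char) (j : Nat) :
    pvLenR (c :: rest) (j+1) = pvLenR rest j := rfl

-- ===== A-side characterisation =====

lemma aStartAux_eq (cs : List Char) : ∀ j : Nat, j ≤ cs.length →
    pvAStartAux cs j = (j : Int) - (pvLenL cs j : Int) := by
  intro j
  induction j with
  | zero => intro _; simp [pvAStartAux, lenL_zero]
  | succ n ih =>
    intro h
    have hn : n < cs.length := by omega
    have hget : PySem.List.pyGet? cs (((n:Nat)+1 : Int) - 1) = some cs[n] := by
      have he : (((n:Nat)+1 : Int) - 1) = ((n : Nat) : Int) := by ring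
      rw [he, PySem.List.pyGet?_natCast]
      simp [List.getElem?_eq_getElem hn]
    simp only [pvAStartAux]
    rw [hget, lenL_succ cs n hn]
    by_cases hc : pvIdentChar cs[n]
    · rw [ih (by omega)]
      simp only [hc, Option.any_some, if_pos]
      push_cast; ring
    · simp [hc]

lemma aStart_eq (cs : List Char) (j : Nat) (hj : j ≤ cs.length) :
    pvAStart cs (j : Int) = (j : Int) - (pvLenL cs j : Int) := by
  unfold pvAStart
  by_cases h : (j : Int) ≤ 0
  · have : j = 0 := by omega
    subst this; simp [lenL_zero]
  · rw [if_neg h]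
    have h2 : ((j : Int)).toNat = j := by omega
    rw [h2, aStartAux_eq cs j hj]

lemma aStart_nonpos (cs : List Char) (e : Int) (h : e ≤ 0) : pvAStart cs e = e := by
  unfold pvAStart; rw [if_pos h]

lemma aEndAux_eq (cs : List Char) : ∀ (f : Nat) (j : Nat), j ≤ cs.length → f = cs.length - j →
    pvAEndAux cs (j : Int) f = (j : Int) + (pvLenR cs j : Int) := by
  intro f
  induction f with
  | zero =>
    intro j hj hf
    have : j = cs.length := by omega
    subst this
    simp [pvAEndAux, pvLenR]
  | succ n ih =>
    intro j hj hf
    have hn : j < cs.length := by omega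
    have hget : PySem.List.pyGet? cs (j : Int) = some cs[j] := by
      rw [PySem.List.pyGet?_natCast]
      simp [List.getElem?_eq_getElem hn]
    simp only [pvAEndAux]
    rw [hget, lenR_eq cs j hn]
    by_cases hc : pvIdentChar cs[j]
    · have he : ((j:Nat) : Int) + 1 = (((j+1 : Nat)) : Int) := by push_cast; ring
      simp only [hc, Option.any_some, if_pos]
      rw [he, ih (j+1) (by omega) (by omega)]
      push_cast; ring
    · simp [hc]

lemma aEnd_eq (cs : List Char) (j : Nat) (hj : j ≤ cs.length) :
    pvAEnd cs (j : Int) = (j : Int) + (pvLenR cs j : Int) := by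
  unfold pvAEnd
  have h1 : (((cs.length : Int)) - (j:Int)).toNat = cs.length - j := by omega
  rw [h1, aEndAux_eq cs (cs.length - j) j hj rfl]

lemma aEnd_step (cs : List Char) (e : Int) (he : e < (cs.length : Int)) :
    pvAEnd cs e = if (PySem.List.pyGet? cs e).any pvIdentChar then pvAEnd cs (e+1) else e := by
  unfold pvAEnd
  have h1 : ((cs.length : Int) - e).toNat = ((cs.length : Int) - (e+1)).toNat + 1 := by omega
  rw [h1]
  simp only [pvAEndAux]

lemma aEnd_neg_all (cs : List Char) : ∀ (k : Nat), 0 < k → k ≤ cs.length →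
    (cs.drop (cs.length - k)).all pvIdentChar = true →
    pvAEnd cs (-(k : Int)) = pvAEnd cs 0 := by
  intro k
  induction k with
  | zero => omega
  | succ n ih =>
    intro _ hk hall
    have hp : cs.length - (n+1) < cs.length := by omega
    rw [aEnd_step cs _ (by omega)]
    have hget : PySem.List.pyGet? cs (-((n+1:Nat) : Int)) = some cs[cs.length - (n+1)] := by
      rw [PySem.List.pyGet?_neg_natCast cs (n+1) (by omega) hk]
      simp [List.getElem?_eq_getElem hp]
    have hmem : cs[cs.length - (n+1)] ∈ cs.drop (cs.length - (n+1)) := by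
      rw [← List.getElem_cons_drop hp]; exact List.mem_cons_self
    have hid : pvIdentChar cs[cs.length - (n+1)] = true := by
      rw [List.all_eq_true] at hall
      exact hall _ hmem
    rw [hget]
    simp only [Option.any_some, hid, if_pos]
    cases n with
    | zero => norm_num
    | succ m =>
      have he : -((m+1+1 : Nat) : Int) + 1 = -((m+1 : Nat) : Int) := by push_cast; ring
      rw [he, ih (by omega) (by omega)
        (all_drop_mono cs (cs.length - (m+1+1)) (cs.length - (m+1)) (by omega) hall)]

lemma aEnd_neg_blocked (cs : List Char) : ∀ (k : Nat), 0 < k → k ≤ cs.length →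
    ¬ (cs.drop (cs.length - k)).all pvIdentChar = true →
    pvAEnd cs (-(k : Int)) = -(k : Int) + (pvLenR cs (cs.length - k) : Int) := by
  intro k
  induction k with
  | zero => omega
  | succ n ih =>
    intro _ hk hnall
    have hp : cs.length - (n+1) < cs.length := by omega
    rw [aEnd_step cs _ (by omega)]
    have hget : PySem.List.pyGet? cs (-((n+1:Nat) : Int)) = some cs[cs.length - (n+1)] := by
      rw [PySem.List.pyGet?_neg_natCast cs (n+1) (by omega) hk]
      simp [List.getElem?_eq_getElem hp]
    rw [hget]
    by_cases hc : pvIdentChar cs[cs.length - (n+1)]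
    · simp only [Option.any_some, hc, if_pos]
      cases n with
      | zero =>
        exfalso; apply hnall
        rw [← List.getElem_cons_drop hp]
        have h2 : cs.length - (0+1) + 1 = cs.length := by omega
        simp [h2, hc]
      | succ m =>
        have he : -((m+1+1 : Nat) : Int) + 1 = -((m+1 : Nat) : Int) := by push_cast; ring
        have hnall' : ¬ (cs.drop (cs.length - (m+1))).all pvIdentChar = true := by
          intro hall'; apply hnall
          rw [← List.getElem_cons_drop hp]
          have h2 : cs.length - (m+1+1) + 1 = cs.length - (m+1) := by omega
          simp [h2, hc, hall']
        rw [he, ih (by omega) (by omega) hnall']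
        rw [lenR_eq cs (cs.length - (m+1+1)) hp]
        have h2 : cs.length - (m+1+1) + 1 = cs.length - (m+1) := by omega
        rw [if_pos hc, h2]
        push_cast; ring
    · simp only [Option.any_some, hc]
      rw [lenR_eq cs (cs.length - (n+1)) hp]
      simp [hc]

-- ===== B-side characterisation =====

lemma bSpans_cons_none (c : Char) (rest : List Char) (i : Int) :
    pvBSpans (c :: rest) i none =
      if pvIdentChar c then pvBSpans rest (i+1) (some i) else pvBSpans rest (i+1) none := by
  by_cases hc : pvIdentChar c <;> simp [pvBSpans, hc]

lemma bSpans_cons_some (c : Char) (rest : List Char) (i s : Int) :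
    pvBSpans (c :: rest) i (some s) =
      if pvIdentChar c then pvBSpans rest (i+1) (some s)
      else (s, i) :: pvBSpans rest (i+1) none := by
  by_cases hc : pvIdentChar c <;> simp [pvBSpans, hc]

lemma bfind_after (cs : List Char) : ∀ (i p : Int) (st : Option Int), p < i →
    (∀ s, st = some s → p < s) →
    (pvBSpans cs i st).find? (fun q => decide (q.1 ≤ p) && decide (p ≤ q.2)) = none := by
  induction cs with
  | nil =>
    intro i p st hpi hst
    cases st with
    | none => rfl
    | some s =>
      have hps := hst s rfl
      show List.find? _ [(s, i)] = none
      rw [List.find?_cons_of_neg (by simp; omega)]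
      rfl
  | cons c rest ih =>
    intro i p st hpi hst
    cases st with
    | none =>
      rw [bSpans_cons_none]
      by_cases hc : pvIdentChar c
      · rw [if_pos hc]
        exact ih (i+1) p (some i) (by omega) (by intro s hs; cases hs; omega)
      · rw [if_neg hc]
        exact ih (i+1) p none (by omega) (by intro s hs; cases hs)
    | some s =>
      have hps := hst s rfl
      rw [bSpans_cons_some]
      by_cases hc : pvIdentChar c
      · rw [if_pos hc]
        exact ih (i+1) p (some s) (by omega) (by intro s' hs'; cases hs'; omega)
      · rw [if_neg hc]
        rw [List.find?_cons_of_neg (by simp; omega)]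
        exact ih (i+1) p none (by omega) (by intro s' hs'; cases hs')

lemma bfind_in (cs : List Char) : ∀ (i s p : Int), s ≤ p → p ≤ i →
    (pvBSpans cs i (some s)).find? (fun q => decide (q.1 ≤ p) && decide (p ≤ q.2)) =
      some (s, i + ((cs.takeWhile pvIdentChar).length : Int)) := by
  induction cs with
  | nil =>
    intro i s p h1 h2
    show List.find? _ [(s, i)] = _
    rw [List.find?_cons_of_pos (by simp; omega)]
    simp
  | cons c rest ih =>
    intro i s p h1 h2
    rw [bSpans_cons_some]
    by_cases hc : pvIdentChar c
    · rw [if_pos hc, ih (i+1) s p h1 (by omega)]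
      rw [List.takeWhile_cons, if_pos hc, List.length_cons]
      simp only [Option.some.injEq, Prod.mk.injEq, true_and]
      push_cast; omega
    · rw [if_neg hc, List.find?_cons_of_pos (by simp; omega)]
      rw [List.takeWhile_cons, if_neg (by simp [hc])]
      simp

lemma bfind_master (cs : List Char) : ∀ (i p : Int), i ≤ p → p ≤ i + cs.length →
    ((pvBSpans cs i none).find? (fun q => decide (q.1 ≤ p) && decide (p ≤ q.2)) =
        pvSpec cs p (p - i).toNat
      ∧ ∀ s : Int, s ≤ i →
        (pvBSpans cs i (some s)).find? (fun q => decide (q.1 ≤ p) && decide (p ≤ q.2)) =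
          if pvLenL cs (p - i).toNat = (p - i).toNat then
            some (s, p + (pvLenR cs (p - i).toNat : Int))
          else pvSpec cs p (p - i).toNat) := by
  induction cs with
  | nil =>
    intro i p hip hpl
    have hpi : p = i := by simp at hpl; omega
    subst hpi
    have hj : (p - p).toNat = 0 := by omega
    constructor
    · show List.find? _ [] = _
      rw [hj]
      simp [pvSpec, lenL_zero, pvLenR]
    · intro s hs
      show List.find? _ [(s, p)] = _
      rw [List.find?_cons_of_pos (by simp; omega), hj, lenL_zero, if_pos rfl]
      have : pvLenR ([] : List Char) 0 = 0 := rfl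
      rw [this]
      norm_num
  | cons c rest ih =>
    intro i p hip hpl
    have hlen : ((c :: rest).length : Int) = (rest.length : Int) + 1 := by
      rw [List.length_cons]; push_cast; ring
    by_cases hpi : p = i
    · subst hpi
      have hj : (p - p).toNat = 0 := by omega
      constructor
      · rw [bSpans_cons_none, hj]
        by_cases hc : pvIdentChar c
        · rw [if_pos hc, bfind_in rest (p+1) p p le_rfl (by omega)]
          unfold pvSpec
          rw [lenL_zero, lenR_cons_zero_pos c rest hc, if_neg (by omega)]
          simp only [Option.some.injEq, Prod.mk.injEq]
          constructor
          · omega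
          · push_cast; ring
        · rw [if_neg hc, bfind_after rest (p+1) p none (by omega) (by intro s hs; cases hs)]
          unfold pvSpec
          rw [lenL_zero, lenR_cons_zero_neg c rest hc, if_pos ⟨rfl, rfl⟩]
      · intro s hs
        rw [bSpans_cons_some, hj, lenL_zero, if_pos rfl]
        by_cases hc : pvIdentChar c
        · rw [if_pos hc, bfind_in rest (p+1) s p hs (by omega)]
          rw [lenR_cons_zero_pos c rest hc]
          simp only [Option.some.injEq, Prod.mk.injEq, true_and]
          push_cast; ring
        · rw [if_neg hc, List.find?_cons_of_pos (by simp; omega)]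
          rw [lenR_cons_zero_neg c rest hc]
          norm_num
    · -- i < p
      have hip1 : i + 1 ≤ p := by omega
      have hpl1 : p ≤ (i + 1) + rest.length := by rw [hlen] at hpl; omega
      obtain ⟨ihn, ihs⟩ := ih (i+1) p hip1 hpl1
      set j1 := (p - (i+1)).toNat with hj1def
      have hj1 : (p - i).toNat = j1 + 1 := by omega
      have hj1r : j1 ≤ rest.length := by omega
      have hj1p : (j1 : Int) = p - i - 1 := by omega
      have hlenL := lenL_cons c rest j1 hj1r
      have hlenR := lenR_cons_succ c rest j1
      have hLle : pvLenL rest j1 ≤ j1 := lenL_le rest j1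
      constructor
      · rw [bSpans_cons_none, hj1]
        by_cases hc : pvIdentChar c
        · rw [if_pos hc, ihs i (by omega)]
          by_cases hL : pvLenL rest j1 = j1
          · rw [if_pos hL]
            unfold pvSpec
            rw [hlenL, hlenR, if_pos hL, if_pos hc, if_neg (by omega)]
            simp only [Option.some.injEq, Prod.mk.injEq]
            constructor
            · omega
            · trivial
          · rw [if_neg hL]
            unfold pvSpec
            rw [hlenL, hlenR, if_neg hL]
        · rw [if_neg hc, ihn]
          have hlenL' : pvLenL (c :: rest) (j1+1) = pvLenL rest j1 := by
            rw [hlenL, if_neg hc]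
            split
            · omega
            · rfl
          unfold pvSpec
          rw [hlenL', hlenR]
      · intro s hs
        rw [bSpans_cons_some, hj1]
        by_cases hc : pvIdentChar c
        · rw [if_pos hc, ihs s (by omega)]
          by_cases hL : pvLenL rest j1 = j1
          · rw [if_pos hL, if_pos (by rw [hlenL, if_pos hL, if_pos hc]), hlenR]
          · rw [if_neg hL, if_neg (by rw [hlenL, if_neg hL]; omega)]
            unfold pvSpec
            rw [hlenL, hlenR, if_neg hL]
        · rw [if_neg hc, List.find?_cons_of_neg (by simp; omega), ihn]
          have hlenL' : pvLenL (c :: rest) (j1+1) = pvLenL rest j1 := by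
            rw [hlenL, if_neg hc]
            split
            · omega
            · rfl
          rw [if_neg (by rw [hlenL']; omega)]
          unfold pvSpec
          rw [hlenL', hlenR]

-- ===== assembly =====

lemma alt_neg (source : String) (offset : Int) (h : offset < 0) :
    word_at_offset_py_alt source offset = "" := by
  unfold word_at_offset_py_alt
  have hmin : min offset ((source.toList.length : Nat) : Int) = offset :=
    min_eq_left (by omega)
  rw [hmin, bfind_after source.toList 0 offset none (by omega) (by intro s hs; cases hs)]

-- ===== VERDICT (by name: the statement is the Claim_ definition above) =====
theorem word_at_offset_py_spec : Claim_unchanged_word_at_offset_py := by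
  intro source offset _ hpre
  unfold Spec_word_at_offset_py
  intro hnd
  unfold Pre_word_at_offset_py at hpre
  by_cases hoff : 0 ≤ offset
  · -- main case: clamp then both return the run around the clamped offset
    unfold word_at_offset_py word_at_offset_py_alt
    set cs := source.toList with hcs
    set off := min offset ((cs.length : Nat) : Int) with hoffdef
    have h0 : 0 ≤ off := by omega
    have hle : off ≤ (cs.length : Int) := by omega
    set j := off.toNat with hjdef
    have hoffj : off = (j : Int) := by omega
    have hj : j ≤ cs.length := by omega
    rw [hoffj, aStart_eq cs j hj, aEnd_eq cs j hj]
    rw [(bfind_master cs 0 (j : Int) (by omega) (by omega)).1]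
    have hj0 : ((j : Int) - 0).toNat = j := by omega
    rw [hj0]
    unfold pvSpec
    by_cases hz : pvLenL cs j = 0 ∧ pvLenR cs j = 0
    · rw [if_pos hz, hz.1, hz.2]
      norm_num
      try rw [slice_self]
      try rfl
    · rw [if_neg hz]
  · -- offset < 0 : B returns "", and outside D_ so does A
    replace hoff : offset < 0 := by omega
    rw [alt_neg source offset hoff]
    unfold word_at_offset_py
    set cs := source.toList with hcs
    have hmin : min offset ((cs.length : Nat) : Int) = offset := min_eq_left (by omega)
    rw [hmin, aStart_nonpos cs offset (by omega)]
    · have hk0 : -(cs.length : Int) ≤ offset := hpre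
      set k := (-offset).toNat with hkdef
      have hkpos : 0 < k := by omega
      have hkle : k ≤ cs.length := by omega
      have hoffk : offset = -(k : Int) := by omega
      have hplt : cs.length - k < cs.length := by omega
      have hget : PySem.List.pyGet? cs offset = some cs[cs.length - k] := by
        rw [hoffk, PySem.List.pyGet?_neg_natCast cs k hkpos hkle]
        simp [List.getElem?_eq_getElem hplt]
      unfold D_word_at_offset_py at hnd
      push Not at hnd
      have hptoNat : ((cs.length : Int) + offset).toNat = cs.length - k := by omega
      by_cases hid : pvIdentChar cs[cs.length - k]
      · -- ¬D_ forces the wraparound scan to come back at or before the offset: A slices to ""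
        have hd4 := hnd hoff hk0 (by rw [hget]; simp [hid])
        rw [hptoNat] at hd4
        simp only [← hcs] at hd4
        obtain ⟨hall, hm⟩ := hd4
        rw [hoffk, aEnd_neg_all cs k hkpos hkle hall]
        rw [show (0 : Int) = ((0 : Nat) : Int) by norm_num, aEnd_eq cs 0 (by omega)]
        have hlr : pvLenR cs 0 = (cs.takeWhile pvIdentChar).length := by simp [pvLenR]
        apply congrArg
        apply List.eq_nil_of_length_eq_zero
        rw [PySem.List.length_slice]
        rw [show -(k:Int) = -((k:Nat):Int) by norm_num]
        rw [PySem.List.clampIdx_neg_natCast cs.length k hkpos]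
        rw [show ((0:Nat) : Int) + (pvLenR cs 0 : Int) = ((pvLenR cs 0 : Nat) : Int) by push_cast; ring]
        rw [PySem.List.clampIdx_natCast, hlr]
        omega
      · -- character at the offset is not an identifier char: A's end-scan stops immediately
        rw [aEnd_step cs offset (by omega), hget]
        simp only [Option.any_some, hid, Bool.false_eq_true, reduceIte]
        try rw [slice_self]
        try rfl

theorem word_at_offset_py_tight : Claim_exact_word_at_offset_py := by
  intro source offset _ hpre hD
  unfold D_word_at_offset_py at hD
  obtain ⟨h1, h2, h3, h4⟩ := hD
  rw [alt_neg source offset h1]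
  unfold word_at_offset_py
  set cs := source.toList with hcs
  have hlen : 0 < cs.length := by omega
  have hmin : min offset ((cs.length : Nat) : Int) = offset := min_eq_left (by omega)
  rw [hmin, aStart_nonpos cs offset (by omega)]
  set k := (-offset).toNat with hkdef
  have hkpos : 0 < k := by omega
  have hkle : k ≤ cs.length := by omega
  have hoffk : offset = -(k : Int) := by omega
  have hplt : cs.length - k < cs.length := by omega
  have hget : PySem.List.pyGet? cs offset = some cs[cs.length - k] := by
    rw [hoffk, PySem.List.pyGet?_neg_natCast cs k hkpos hkle]
    simp [List.getElem?_eq_getElem hplt]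
  have hid : pvIdentChar cs[cs.length - k] = true := by
    rw [hget] at h3; simpa using h3
  have hptoNat : ((cs.length : Int) + offset).toNat = cs.length - k := by omega
  rw [hptoNat] at h4
  by_cases hall : (cs.drop (cs.length - k)).all pvIdentChar = true
  · -- wraparound case: the scan comes back past the offset, yielding a nonempty slice
    have hm : cs.length - k < (cs.takeWhile pvIdentChar).length := by
      rcases h4 with h | h
      · exact absurd hall h
      · exact h
    rw [hoffk, aEnd_neg_all cs k hkpos hkle hall]
    rw [show (0 : Int) = ((0 : Nat) : Int) by norm_num, aEnd_eq cs 0 (by omega)]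
    have hlr : pvLenR cs 0 = (cs.takeWhile pvIdentChar).length := by simp [pvLenR]
    apply ofList_ne_empty
    intro hnil
    have hlnil := congrArg List.length hnil
    rw [PySem.List.length_slice] at hlnil
    rw [show -(k:Int) = -((k:Nat):Int) by norm_num] at hlnil
    rw [PySem.List.clampIdx_neg_natCast cs.length k hkpos] at hlnil
    rw [show ((0:Nat) : Int) + (pvLenR cs 0 : Int) = ((pvLenR cs 0 : Nat) : Int) by push_cast; ring] at hlnil
    rw [PySem.List.clampIdx_natCast, hlr] at hlnil
    have hmlen : (cs.takeWhile pvIdentChar).length ≤ cs.length :=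
      (List.takeWhile_prefix _).length_le
    rw [List.length_nil] at hlnil
    omega
  · -- blocked case: the scan stops inside the suffix, strictly after the pointed-at char
    rw [hoffk, aEnd_neg_blocked cs k hkpos hkle hall]
    have hrpos : 0 < pvLenR cs (cs.length - k) := by
      rw [lenR_eq cs (cs.length - k) hplt, if_pos hid]; omega
    have hrlt : pvLenR cs (cs.length - k) < k := by
      have hle2 : pvLenR cs (cs.length - k) ≤ (cs.drop (cs.length - k)).length :=
        (List.takeWhile_prefix _).length_le
      have hdl : (cs.drop (cs.length - k)).length = k := by simp [List.length_drop]; omega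
      rcases Nat.lt_or_ge (pvLenR cs (cs.length - k)) k with h | h
      · exact h
      · exfalso; apply hall
        apply all_of_takeWhile_length
        unfold pvLenR at *
        omega
    apply ofList_ne_empty
    intro hnil
    have hlnil := congrArg List.length hnil
    rw [PySem.List.length_slice] at hlnil
    rw [show -(k:Int) = -((k:Nat):Int) by norm_num] at hlnil
    rw [show -((k:Nat):Int) + (pvLenR cs (cs.length - k) : Int) =
        -(((k - pvLenR cs (cs.length - k) : Nat)) : Int) by omega] at hlnil
    rw [PySem.List.clampIdx_neg_natCast cs.length k hkpos,
      PySem.List.clampIdx_neg_natCast cs.length (k - pvLenR cs (cs.length - k)) (by omega)] at hlnil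
    rw [List.length_nil] at hlnil
    omega

-- ===== VERDICT (continued): remaining claims =====
theorem word_at_offset_py_changed : Claim_changed_word_at_offset_py := by
  unfold Claim_changed_word_at_offset_py; decide
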